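-- pv_equiv track=rewrite | github.com/meatripoli/PythonCode | pattern_sum.py | pattern_sum
-- ===== SOURCE A (Python) =====
-- def pattern_sum(a, b):
--     previous_value=0
--     my_list=[]
--     for n in range(b):
--         number=((10**n)*a)+previous_value
--         my_list.append(number)
--         previous_value=number
--     total=sum(my_list)
--     return total
-- ===== SOURCE B (Python) =====
-- def pattern_sum(a, b):
--     if b <= 0:
--         return 0
--     return a * ((10 ** (b + 1) - 10 - 9 * b) // 81)
-- ===== Notes on version B (the rewrite author's own statement) =====
-- stated objective: faster
-- what changed: Replaced the O(b)-iteration loop that builds a list of pattern numbers and sums it with the closed form a*(10^(b+1)-10-9b)/81 computed with one big-int power and one exact division.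
import Mathlib
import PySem

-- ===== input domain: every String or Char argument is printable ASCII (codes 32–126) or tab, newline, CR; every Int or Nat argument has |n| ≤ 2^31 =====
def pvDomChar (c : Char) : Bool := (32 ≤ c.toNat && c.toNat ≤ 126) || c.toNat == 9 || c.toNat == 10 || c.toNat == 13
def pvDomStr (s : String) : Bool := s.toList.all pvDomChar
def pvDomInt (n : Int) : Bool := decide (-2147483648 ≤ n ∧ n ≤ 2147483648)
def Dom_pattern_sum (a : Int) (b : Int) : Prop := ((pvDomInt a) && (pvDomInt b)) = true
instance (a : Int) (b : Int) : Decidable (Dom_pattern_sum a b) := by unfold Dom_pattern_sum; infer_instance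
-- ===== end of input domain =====

-- B replaces A's O(b) accumulation loop with the closed form a*(10^(b+1)-10-9b)/81 (objective: faster; measured).


-- ===== PORT A =====
-- for n in range(b): number = 10**n*a + previous; append; previous = number; return sum(my_list)
-- 10**n: every n produced by range(b) is ≥ 0, so n.toNat is exact here.
def pattern_sum (a : Int) (b : Int) : Int :=
  let st := (PySem.List.pyRange 0 b 1).foldl
    (fun (st : List Int × Int) n =>
      let number := 10 ^ n.toNat * a + st.2
      (st.1 ++ [number], number))
    ([], 0)
  st.1.sum

-- ===== PORT B =====
def pattern_sum_alt (a : Int) (b : Int) : Int :=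
  if b ≤ 0 then 0
  else a * PySem.Int.floordiv (10 ^ (b + 1).toNat - 10 - 9 * b) 81

-- ===== PRECONDITION & SPEC =====
def Spec_pattern_sum (a : Int) (b : Int) (out : Int) : Prop := out = pattern_sum_alt a b
instance (a : Int) (b : Int) (out : Int) : Decidable (Spec_pattern_sum a b out) := by unfold Spec_pattern_sum; infer_instance

-- ===== CLAIM (what is proved, stated in full; the proofs are below) =====
def Claim_equal_pattern_sum : Prop := ∀ (a : Int) (b : Int), Dom_pattern_sum a b → Spec_pattern_sum a b (pattern_sum a b)

-- ===== LEMMAS AND PROOFS =====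

-- repunit with k ones, and the partial sum of repunits 1..k
def pvRep : Nat → Int
  | 0 => 0
  | k + 1 => 10 * pvRep k + 1

def pvRepSum : Nat → Int
  | 0 => 0
  | k + 1 => pvRepSum k + pvRep (k + 1)

theorem pvRep_nine (k : Nat) : 9 * pvRep k = 10 ^ k - 1 := by
  induction k with
  | zero => simp [pvRep]
  | succ k ih => simp only [pvRep, pow_succ]; ring_nf; ring_nf at ih; linarith

theorem pvRepSum_closed (k : Nat) :
    81 * pvRepSum k = 10 ^ (k + 1) - 10 - 9 * (k : Int) := by
  induction k with
  | zero => simp [pvRepSum]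
  | succ k ih =>
    have h9 := pvRep_nine (k + 1)
    simp only [pvRepSum]
    push_cast
    have : (10 : Int) ^ (k + 1 + 1) = 10 * 10 ^ (k + 1) := by ring
    linarith

theorem pvLoop_inv (a : Int) (k : Nat) :
    ((PySem.List.pyRange 0 (k : Int) 1).foldl
      (fun (st : List Int × Int) n =>
        let number := 10 ^ n.toNat * a + st.2
        (st.1 ++ [number], number))
      ([], 0)) =
    (((List.range k).map (fun i => a * pvRep (i + 1))), a * pvRep k) := by
  induction k with
  | zero => simp [PySem.List.pyRange_one_eq_nil, pvRep]
  | succ k ih =>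
    have hsplit : PySem.List.pyRange 0 ((k : Int) + 1) 1
        = PySem.List.pyRange 0 (k : Int) 1 ++ [(k : Int)] :=
      PySem.List.pyRange_one_succ_right (by exact_mod_cast Int.natCast_nonneg k)
    have hk : ((k : Int) + 1) = ((k + 1 : Nat) : Int) := by push_cast; ring
    rw [← hk, hsplit, List.foldl_append, ih]
    simp only [List.foldl_cons, List.foldl_nil, Int.toNat_natCast, List.range_succ,
      List.map_append, List.map_cons, List.map_nil]
    have hstep : 10 ^ k * a + a * pvRep k = a * pvRep (k + 1) := by
      simp only [pvRep]; linear_combination (-a) * pvRep_nine k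
    rw [hstep]

theorem pvSum_map (a : Int) (k : Nat) :
    ((List.range k).map (fun i => a * pvRep (i + 1))).sum = a * pvRepSum k := by
  induction k with
  | zero => simp [pvRepSum]
  | succ k ih => simp [List.range_succ, ih, pvRepSum]; ring

theorem pattern_sum_eq (a : Int) (b : Int) : pattern_sum a b = pattern_sum_alt a b := by
  by_cases hb : b ≤ 0
  · simp [pattern_sum, pattern_sum_alt, hb, PySem.List.pyRange_one_eq_nil hb]
  · push Not at hb
    have hbk : b = (b.toNat : Int) := (Int.toNat_of_nonneg (le_of_lt hb)).symm
    set k := b.toNat with hk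
    have hS : (10 : Int) ^ (b + 1).toNat - 10 - 9 * b = 81 * pvRepSum k := by
      have h1 : (b + 1).toNat = k + 1 := by omega
      rw [h1, pvRepSum_closed k, hbk]
    unfold pattern_sum pattern_sum_alt
    rw [if_neg (not_le.mpr hb), hS]
    have hdiv : PySem.Int.floordiv (81 * pvRepSum k) 81 = pvRepSum k := by
      rw [PySem.Int.floordiv_eq_ediv_of_pos (by norm_num)]
      exact Int.mul_ediv_cancel_left _ (by norm_num)
    rw [hdiv]
    conv_lhs => rw [hbk]
    rw [pvLoop_inv a k]
    exact pvSum_map a k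

-- ===== VERDICT (by name: the statement is the Claim_ definition above) =====
theorem pattern_sum_spec : Claim_equal_pattern_sum := by
  intro a b _
  exact pattern_sum_eq a b
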